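-- pv_equiv track=rewrite | github.com/bjh-insitro/cell_OS | src/cell_os/calibration/identifiability_design_2d1.py | design_vessel_ids
-- ===== SOURCE A (Python) =====
-- from typing import Dict, List, Tuple
--
-- def design_vessel_ids(n_vessels: int, regime_label: str) -> List[str]:
--     """
--     Generate vessel IDs for a regime.
--
--     Args:
--         n_vessels: Number of vessels (must fit in 96-well plate grid)
--         regime_label: Regime label (e.g., "A_clean", "B_enriched")
--
--     Returns:
--         List of vessel IDs like "Plate_A_A01", "Plate_A_A02", ...
--         (Format matches "Plate{X}_{well}" so detector_stack can parse)
--     """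
--     if n_vessels > 96:
--         raise ValueError(f"n_vessels={n_vessels} exceeds 96-well plate capacity")
--
--     # Use plate ID format that detector_stack can parse: "Plate{X}_{well}"
--     plate_id = f"Plate_{regime_label[0]}"  # Plate_A, Plate_B, Plate_C, Plate_D
--
--     vessel_ids = []
--     for i in range(n_vessels):
--         row = chr(65 + (i // 12))  # A-H
--         col = (i % 12) + 1         # 1-12
--         vessel_ids.append(f"{plate_id}_{row}{col:02d}")
--
--     return vessel_ids
-- ===== SOURCE B (Python) =====
-- def design_vessel_ids(n_vessels: int, regime_label: str):
--     if n_vessels > 96: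
--         raise ValueError(f"n_vessels={n_vessels} exceeds 96-well plate capacity")
--     plate_id = f"Plate_{regime_label[0]}"
--     vessel_ids = []
--     for r in range(8):                      # rows A-H, walked structurally
--         for c in range(1, 13):              # columns 1-12
--             if len(vessel_ids) >= n_vessels:
--                 return vessel_ids
--             vessel_ids.append(f"{plate_id}_{chr(65 + r)}{c:02d}")
--     return vessel_ids
-- ===== Notes on version B (the rewrite author's own statement) =====
-- stated objective: idiomatic
-- what changed: Replaced the flat loop over range(n_vessels) with div/mod arithmetic by a structural nested walk over the 8x12 well grid (rows A-H outer, columns 1-12 inner) with an early return once n_vessels IDs are emitted.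
-- outside the precondition, e.g. on design_vessel_ids(97, 'A_clean'): A raises ValueError, B raises ValueError; on design_vessel_ids(5, ''): A raises IndexError, B raises IndexError
import Mathlib
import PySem

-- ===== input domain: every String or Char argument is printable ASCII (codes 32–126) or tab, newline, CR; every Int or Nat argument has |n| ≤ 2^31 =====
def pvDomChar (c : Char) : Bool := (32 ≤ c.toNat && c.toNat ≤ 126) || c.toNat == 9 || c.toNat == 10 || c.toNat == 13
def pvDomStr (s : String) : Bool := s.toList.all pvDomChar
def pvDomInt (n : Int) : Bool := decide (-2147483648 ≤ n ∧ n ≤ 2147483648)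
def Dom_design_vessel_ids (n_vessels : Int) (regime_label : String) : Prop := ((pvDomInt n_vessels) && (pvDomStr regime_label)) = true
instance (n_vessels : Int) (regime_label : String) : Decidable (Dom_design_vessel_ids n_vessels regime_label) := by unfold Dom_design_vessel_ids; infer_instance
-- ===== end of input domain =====

-- B walks the 8x12 well grid structurally (rows outer, columns inner) with an early return,
-- instead of A's flat range(n_vessels) loop with i//12, i%12 arithmetic (objective: idiomatic).

-- f"{col:02d}" for the column number (always 1..12 here): zero-pad to width 2 (exact on 0 ≤ c < 100)
def pvPad2 (c : Int) : List Char := if c < 10 then '0' :: PySem.Int.toChars c else PySem.Int.toChars c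

-- ===== PORT A =====
def design_vessel_ids (n_vessels : Int) (regime_label : String) : List String :=
  if n_vessels > 96 then []  -- Python raises ValueError here; excluded by Pre_
  else
    -- regime_label[0]; Pre_ excludes the empty string (IndexError)
    let plate_id : List Char := "Plate_".toList ++ ((PySem.Str.pyGet? regime_label 0).elim [] (fun c => [c]))
    (PySem.List.pyRange 0 n_vessels 1).foldl (fun acc i =>
      let row : Char := Char.ofNat (65 + (PySem.Int.floordiv i 12)).toNat
      let col : Int := PySem.Int.mod i 12 + 1
      acc ++ [String.ofList (plate_id ++ '_' :: row :: pvPad2 col)]) []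

-- ===== PORT B =====
-- inner 'for c in range(1, 13)' with the early 'return vessel_ids'; the Bool says 'returned early'
def pvGoCol (plate : List Char) (n : Int) (row : Char) (c : Int) (fuel : Nat) (acc : List String) :
    List String × Bool :=
  match fuel with
  | 0 => (acc, false)
  | fuel' + 1 =>
    if (acc.length : Int) ≥ n then (acc, true)
    else pvGoCol plate n row (c + 1) fuel' (acc ++ [String.ofList (plate ++ '_' :: row :: pvPad2 c)])

-- outer 'for r in range(8)'
def pvGoRow (plate : List Char) (n : Int) (r : Nat) (fuel : Nat) (acc : List String) : List String :=
  match fuel with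
  | 0 => acc
  | fuel' + 1 =>
    match pvGoCol plate n (Char.ofNat (65 + r)) 1 12 acc with
    | (acc', true) => acc'
    | (acc', false) => pvGoRow plate n (r + 1) fuel' acc'

def design_vessel_ids_alt (n_vessels : Int) (regime_label : String) : List String :=
  if n_vessels > 96 then []  -- Python raises ValueError here; excluded by Pre_
  else
    let plate_id : List Char := "Plate_".toList ++ ((PySem.Str.pyGet? regime_label 0).elim [] (fun c => [c]))
    pvGoRow plate_id n_vessels 0 8 []

-- ===== PRECONDITION & SPEC =====
-- Pre_ excludes exactly the inputs where A raises: n_vessels > 96 (ValueError) and the empty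
-- regime_label (IndexError on regime_label[0]). B raises the same exceptions there.
def Pre_design_vessel_ids (n_vessels : Int) (regime_label : String) : Prop :=
  n_vessels ≤ 96 ∧ regime_label ≠ ""
instance (n_vessels : Int) (regime_label : String) : Decidable (Pre_design_vessel_ids n_vessels regime_label) := by
  unfold Pre_design_vessel_ids; infer_instance
def pvWitness_design_vessel_ids : Int × String := (13, "A_clean")

def Spec_design_vessel_ids (n_vessels : Int) (regime_label : String) (out : List String) : Prop := out = design_vessel_ids_alt n_vessels regime_label
instance (n_vessels : Int) (regime_label : String) (out : List String) : Decidable (Spec_design_vessel_ids n_vessels regime_label out) := by unfold Spec_design_vessel_ids; infer_instance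

-- ===== CLAIM (what is proved, stated in full; the proofs are below) =====
def Claim_equal_design_vessel_ids : Prop := ∀ (n_vessels : Int) (regime_label : String), Dom_design_vessel_ids n_vessels regime_label → Pre_design_vessel_ids n_vessels regime_label → Spec_design_vessel_ids n_vessels regime_label (design_vessel_ids n_vessels regime_label)

-- ===== LEMMAS AND PROOFS =====

-- plate-free mirrors of the two loops: the per-ID suffix lists ('_' :: row :: col), which are
-- closed terms once n is fixed, so the two sides can be compared by `decide`
def pvTailsA (n : Int) : List (List Char) :=
  (PySem.List.pyRange 0 n 1).map (fun i =>
    '_' :: Char.ofNat (65 + (PySem.Int.floordiv i 12)).toNat :: pvPad2 (PySem.Int.mod i 12 + 1))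

def pvTailCol (n : Int) (row : Char) (c : Int) (fuel : Nat) (len : Nat) : List (List Char) × Bool :=
  match fuel with
  | 0 => ([], false)
  | fuel' + 1 =>
    if (len : Int) ≥ n then ([], true)
    else (('_' :: row :: pvPad2 c) :: (pvTailCol n row (c + 1) fuel' (len + 1)).1,
          (pvTailCol n row (c + 1) fuel' (len + 1)).2)

def pvTailRow (n : Int) (r : Nat) (fuel : Nat) (len : Nat) : List (List Char) :=
  match fuel with
  | 0 => []
  | fuel' + 1 =>
    let p := pvTailCol n (Char.ofNat (65 + r)) 1 12 len
    if p.2 then p.1 else p.1 ++ pvTailRow n (r + 1) fuel' (len + p.1.length)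

theorem pvGoCol_eq (plate : List Char) (n : Int) (row : Char) :
    ∀ (fuel : Nat) (c : Int) (acc : List String),
      pvGoCol plate n row c fuel acc =
        (acc ++ (pvTailCol n row c fuel acc.length).1.map (fun t => String.ofList (plate ++ t)),
         (pvTailCol n row c fuel acc.length).2) := by
  intro fuel
  induction fuel with
  | zero => intro c acc; simp [pvGoCol, pvTailCol]
  | succ fuel' ih =>
    intro c acc
    rw [pvGoCol, pvTailCol]
    by_cases h : (acc.length : Int) ≥ n
    · simp [h]
    · rw [if_neg h, if_neg h, ih]
      simp

theorem pvGoRow_eq (plate : List Char) (n : Int) :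
    ∀ (fuel : Nat) (r : Nat) (acc : List String),
      pvGoRow plate n r fuel acc =
        acc ++ (pvTailRow n r fuel acc.length).map (fun t => String.ofList (plate ++ t)) := by
  intro fuel
  induction fuel with
  | zero => intro r acc; simp [pvGoRow, pvTailRow]
  | succ fuel' ih =>
    intro r acc
    rw [pvGoRow, pvTailRow]
    rw [pvGoCol_eq]
    by_cases h : (pvTailCol n (Char.ofNat (65 + r)) 1 12 acc.length).2
    · simp [h]
    · simp only [h, Bool.false_eq_true, if_false, ih]
      simp [List.map_append]

theorem design_vessel_ids_eq_tails (n : Int) (s : String) (h96 : ¬ n > 96) :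
    design_vessel_ids n s =
      (pvTailsA n).map (fun t => String.ofList
        (("Plate_".toList ++ ((PySem.Str.pyGet? s 0).elim [] (fun c => [c]))) ++ t)) := by
  rw [design_vessel_ids, if_neg h96]
  rw [pvTailsA, PySem.List.foldl_append_singleton_eq_map]
  simp [List.map_map, Function.comp]

theorem design_vessel_ids_alt_eq_tails (n : Int) (s : String) (h96 : ¬ n > 96) :
    design_vessel_ids_alt n s =
      (pvTailRow n 0 8 0).map (fun t => String.ofList
        (("Plate_".toList ++ ((PySem.Str.pyGet? s 0).elim [] (fun c => [c]))) ++ t)) := by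
  rw [design_vessel_ids_alt, if_neg h96]
  rw [pvGoRow_eq]
  simp

theorem pvTails_eq_fin : ∀ k : Fin 97, pvTailsA (k : Int) = pvTailRow (k : Int) 0 8 0 := by
  decide

theorem pvTailsA_nonpos (n : Int) (hn : n ≤ 0) : pvTailsA n = [] := by
  rw [pvTailsA, PySem.List.pyRange_one]
  simp
  omega

theorem pvTailRow_nonpos (n : Int) (hn : n ≤ 0) : pvTailRow n 0 8 0 = [] := by
  have hc : pvTailCol n (Char.ofNat 65) 1 12 0 = ([], true) := by
    rw [pvTailCol, if_pos (by exact_mod_cast hn)]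
  rw [pvTailRow]
  simp [hc]

theorem pvTails_eq (n : Int) (hn : n ≤ 96) : pvTailsA n = pvTailRow n 0 8 0 := by
  by_cases h0 : n ≤ 0
  · rw [pvTailsA_nonpos n h0, pvTailRow_nonpos n h0]
  · have hk : n = ((⟨n.toNat, by omega⟩ : Fin 97) : Int) := by simp; omega
    rw [hk]
    exact pvTails_eq_fin _

-- ===== VERDICT (by name: the statement is the Claim_ definition above) =====
theorem design_vessel_ids_spec : Claim_equal_design_vessel_ids := by
  intro n s _hdom hpre
  unfold Spec_design_vessel_ids
  obtain ⟨h96, _hs⟩ := hpre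
  have h96' : ¬ n > 96 := by omega
  rw [design_vessel_ids_eq_tails n s h96', design_vessel_ids_alt_eq_tails n s h96',
    pvTails_eq n h96]
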